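-- pv_equiv track=rewrite | github.com/samhithch-prog/PyStreamlineAI | src/ui/pages/careers/jobs_tab.py | _build_advisor_recent_windows
-- ===== SOURCE A (Python) =====
-- CAREERS_ADVISOR_DEFAULT_RECENT_DAYS = 1
--
-- def _normalize_supported_posted_window_days(days: int) -> int:
--     safe_days = max(0, int(days or 0))
--     if safe_days <= 0:
--         return 0
--     if safe_days <= 1:
--         return 1
--     if safe_days <= 3:
--         return 3
--     if safe_days <= 7:
--         return 7
--     if safe_days <= 14:
--         return 14
--     return 30
--
-- def _build_advisor_recent_windows(base_days: int) -> list[int]: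
--     normalized_days = _normalize_supported_posted_window_days(int(base_days or 0))
--     if normalized_days <= 0:
--         normalized_days = CAREERS_ADVISOR_DEFAULT_RECENT_DAYS
--     fallback_map: dict[int, list[int]] = {
--         1: [1, 3, 7],
--         3: [3, 7, 14],
--         7: [7, 14, 30],
--         14: [14, 30],
--         30: [30],
--     }
--     values = fallback_map.get(normalized_days, [normalized_days])
--     deduped: list[int] = []
--     seen: set[int] = set()
--     for item in values:
--         safe = _normalize_supported_posted_window_days(int(item or 0))
--         if safe <= 0 or safe in seen:
--             continue
--         seen.add(safe)
--         deduped.append(safe)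
--     return deduped or [CAREERS_ADVISOR_DEFAULT_RECENT_DAYS]
-- ===== SOURCE B (Python) =====
-- CAREERS_ADVISOR_DEFAULT_RECENT_DAYS = 1
--
-- def _normalize_supported_posted_window_days(days: int) -> int:
--     safe_days = max(0, int(days or 0))
--     if safe_days <= 0:
--         return 0
--     if safe_days <= 1:
--         return 1
--     if safe_days <= 3:
--         return 3
--     if safe_days <= 7:
--         return 7
--     if safe_days <= 14:
--         return 14
--     return 30
--
-- def _build_advisor_recent_windows(base_days: int) -> list[int]:
--     n = _normalize_supported_posted_window_days(int(base_days or 0))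
--     if n <= 0:
--         n = CAREERS_ADVISOR_DEFAULT_RECENT_DAYS
--     supported = (1, 3, 7, 14, 30)
--     i = supported.index(n)
--     return list(supported[i:i + 3])
-- ===== Notes on version B (the rewrite author's own statement) =====
-- stated objective: simpler
-- what changed: Replaces the fallback dict plus re-normalizing dedup loop with a three-element slice of the ordered supported tuple starting at the normalized value's index.
import Mathlib
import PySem

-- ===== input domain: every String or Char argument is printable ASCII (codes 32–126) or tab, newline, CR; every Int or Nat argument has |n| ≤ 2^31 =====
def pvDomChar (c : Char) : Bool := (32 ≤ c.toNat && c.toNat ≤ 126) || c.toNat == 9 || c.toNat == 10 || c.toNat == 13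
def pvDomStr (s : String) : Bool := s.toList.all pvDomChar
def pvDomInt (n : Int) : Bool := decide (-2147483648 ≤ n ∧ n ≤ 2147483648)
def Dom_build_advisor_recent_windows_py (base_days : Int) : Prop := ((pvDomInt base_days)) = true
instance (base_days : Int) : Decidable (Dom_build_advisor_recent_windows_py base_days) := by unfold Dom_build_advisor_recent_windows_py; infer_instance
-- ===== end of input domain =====

-- B replaces A's fallback dict and re-normalizing dedup loop with a width-3 slice of the
-- ordered supported tuple at the normalized value's index (objective: simpler).

-- ===== PORT A =====
-- shared module helper _normalize_supported_posted_window_days (used by both Pythons)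
def normalize_supported_posted_window_days (days : Int) : Int :=
  -- int(days or 0) = days for ints
  let safe_days : Int := max 0 days
  if safe_days ≤ 0 then 0
  else if safe_days ≤ 1 then 1
  else if safe_days ≤ 3 then 3
  else if safe_days ≤ 7 then 7
  else if safe_days ≤ 14 then 14
  else 30

-- A's body after the call to the normalizer (kept as a helper so the proof can case on its argument)
def pvAfterNormA (normalized_days0 : Int) : List Int :=
  let normalized_days : Int := if normalized_days0 ≤ 0 then 1 else normalized_days0
  let fallback_map : PySem.Dict Int (List Int) :=
    PySem.Dict.ofList [(1, [1, 3, 7]), (3, [3, 7, 14]), (7, [7, 14, 30]), (14, [14, 30]), (30, [30])]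
  let values : List Int := PySem.Dict.getD fallback_map normalized_days [normalized_days]
  -- dedup loop over values with a seen set
  let st := values.foldl
    (fun (st : List Int × PySem.Set Int) item =>
      let safe := normalize_supported_posted_window_days item  -- int(item or 0) = item
      if safe ≤ 0 || PySem.Set.contains st.2 safe then st
      else (st.1 ++ [safe], PySem.Set.add st.2 safe))
    ([], PySem.Set.empty)
  if st.1 = [] then [1] else st.1

def build_advisor_recent_windows_py (base_days : Int) : List Int :=
  pvAfterNormA (normalize_supported_posted_window_days base_days)

-- ===== PORT B =====
def pvAfterNormB (n0 : Int) : List Int :=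
  let n : Int := if n0 ≤ 0 then 1 else n0
  let supported : List Int := [1, 3, 7, 14, 30]
  -- supported.index(n): n is always present here, so the (unreachable) none case yields []
  match PySem.List.index? supported n with
  | some i => PySem.List.slice supported (some (i : Int)) (some ((i : Int) + 3))
  | none => []

def build_advisor_recent_windows_py_alt (base_days : Int) : List Int :=
  pvAfterNormB (normalize_supported_posted_window_days base_days)

-- ===== PRECONDITION & SPEC =====
def Spec_build_advisor_recent_windows_py (base_days : Int) (out : List Int) : Prop := out = build_advisor_recent_windows_py_alt base_days
instance (base_days : Int) (out : List Int) : Decidable (Spec_build_advisor_recent_windows_py base_days out) := by unfold Spec_build_advisor_recent_windows_py; infer_instance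

-- ===== CLAIM (what is proved, stated in full; the proofs are below) =====
def Claim_equal_build_advisor_recent_windows_py : Prop := ∀ (base_days : Int), Dom_build_advisor_recent_windows_py base_days → Spec_build_advisor_recent_windows_py base_days (build_advisor_recent_windows_py base_days)

-- ===== LEMMAS AND PROOFS =====
theorem normalize_cases (d : Int) :
    normalize_supported_posted_window_days d = 0 ∨ normalize_supported_posted_window_days d = 1 ∨
    normalize_supported_posted_window_days d = 3 ∨ normalize_supported_posted_window_days d = 7 ∨
    normalize_supported_posted_window_days d = 14 ∨ normalize_supported_posted_window_days d = 30 := by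
  simp only [normalize_supported_posted_window_days]
  split_ifs <;> simp

theorem afterNorm_eq (n : Int)
    (h : n = 0 ∨ n = 1 ∨ n = 3 ∨ n = 7 ∨ n = 14 ∨ n = 30) :
    pvAfterNormA n = pvAfterNormB n := by
  rcases h with h | h | h | h | h | h <;> subst h <;> decide

-- ===== VERDICT (by name: the statement is the Claim_ definition above) =====
theorem build_advisor_recent_windows_py_spec : Claim_equal_build_advisor_recent_windows_py := by
  intro base_days _
  unfold Spec_build_advisor_recent_windows_py build_advisor_recent_windows_py build_advisor_recent_windows_py_alt
  exact afterNorm_eq _ (normalize_cases base_days)
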